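-- pv_equiv track=rewrite | github.com/Ra0ul/Algorithm | 프로그래머스/lv0/120850. 문자열 정렬하기 （1）/문자열 정렬하기 （1）.py | solution
-- ===== SOURCE A (Python) =====
-- def solution(my_string):
--     answer = []
--     """
--     1. 숫자만 먼저 뽑기
--     2. 숫자를 오름차순 정렬하기
--
--     """
--     for i in my_string:
--         if i.isalpha() != True:
--             answer.append(int(i))
--     answer.sort()
--     return answer
-- ===== SOURCE B (Python) =====
-- def solution(my_string):
--     counts = [0] * 10
--     for c in my_string:
--         if not c.isalpha():
--             counts[int(c)] += 1
--     return [d for d in range(10) for _ in range(counts[d])]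
-- ===== Notes on version B (the rewrite author's own statement) =====
-- stated objective: alternative
-- what changed: Replaces filter-then-comparison-sort with a single counting pass over 10 digit buckets followed by an in-order emit (counting sort); intended as faster but measured only ~1.4x at the largest size, so no speed is claimed.
import Mathlib
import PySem

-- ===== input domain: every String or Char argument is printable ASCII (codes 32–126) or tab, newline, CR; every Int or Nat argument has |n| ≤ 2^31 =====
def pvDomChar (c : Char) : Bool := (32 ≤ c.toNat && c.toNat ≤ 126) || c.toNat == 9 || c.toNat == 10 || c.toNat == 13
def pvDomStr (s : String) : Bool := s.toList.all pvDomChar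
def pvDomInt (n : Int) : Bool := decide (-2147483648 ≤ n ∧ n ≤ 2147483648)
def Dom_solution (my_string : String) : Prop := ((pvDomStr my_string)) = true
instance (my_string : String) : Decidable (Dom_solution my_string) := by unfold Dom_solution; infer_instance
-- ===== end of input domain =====

-- B replaces filter-then-sort with a one-pass counting sort over the ten digit buckets (alternative algorithm; no comparison sort).


-- ===== PORT A =====
-- int(i) on a one-character string is PySem.Int.ofChars? [i]; none = ValueError.
-- Those inputs are excluded by Pre_solution, so the .getD 0 default is never taken on admitted inputs.
def solution (my_string : String) : List Int :=
  let answer : List Int := my_string.toList.foldl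
    (fun acc i => if PySem.Chars.isalpha i ≠ true then acc ++ [(PySem.Int.ofChars? [i]).getD 0] else acc) []
  PySem.List.sorted answer (fun x => x) false

-- ===== PORT B =====
-- counts[int(c)] += 1 is List.modify at index int(c) (always 0..9 when int(c) parses, so no IndexError arises).
def solution_alt (my_string : String) : List Int :=
  let counts : List Nat := my_string.toList.foldl
    (fun cnt c => if !(PySem.Chars.isalpha c)
                  then cnt.modify (((PySem.Int.ofChars? [c]).getD 0).toNat) (· + 1) else cnt)
    (List.replicate 10 0)
  (List.range 10).flatMap (fun d => List.replicate (counts.getD d 0) ((d : Int)))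

-- ===== PRECONDITION & SPEC =====
-- Pre_ excludes exactly the strings containing a character that is neither alphabetic nor a digit:
-- there int(i) raises ValueError in A (and in B alike), so A returns on precisely the admitted inputs.
def Pre_solution (my_string : String) : Prop :=
  my_string.toList.all (fun c => PySem.Chars.isalpha c || PySem.Chars.isdigit c) = true
instance (my_string : String) : Decidable (Pre_solution my_string) := by unfold Pre_solution; infer_instance

def pvWitness_solution : String := "h3ll0o1"

def Spec_solution (my_string : String) (out : List Int) : Prop := out = solution_alt my_string
instance (my_string : String) (out : List Int) : Decidable (Spec_solution my_string out) := by unfold Spec_solution; infer_instance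

-- ===== CLAIM (what is proved, stated in full; the proofs are below) =====
def Claim_equal_solution : Prop := ∀ (my_string : String), Dom_solution my_string → Pre_solution my_string → Spec_solution my_string (solution my_string)

-- ===== LEMMAS AND PROOFS =====

-- a Char is determined by its code point
theorem pv_char_eq_of_toNat {c d : Char} (h : c.toNat = d.toNat) : c = d :=
  Char.ext (UInt32.toNat_inj.mp h)

theorem pv_isdigit_bounds (c : Char) (h : PySem.Chars.isdigit c = true) :
    48 ≤ c.toNat ∧ c.toNat ≤ 57 := by
  simp [PySem.Chars.isdigit, Char.le_def] at h
  unfold Char.toNat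
  exact ⟨h.1, h.2⟩

-- int(c) of a digit character is its digit value
theorem pv_ofChars_digit (c : Char) (h : PySem.Chars.isdigit c = true) :
    PySem.Int.ofChars? [c] = some ((c.toNat - 48 : Nat) : Int) := by
  obtain ⟨h1, h2⟩ := pv_isdigit_bounds c h
  have h10 : c.toNat = 48 ∨ c.toNat = 49 ∨ c.toNat = 50 ∨ c.toNat = 51 ∨ c.toNat = 52 ∨
      c.toNat = 53 ∨ c.toNat = 54 ∨ c.toNat = 55 ∨ c.toNat = 56 ∨ c.toNat = 57 := by omega
  rcases h10 with h'|h'|h'|h'|h'|h'|h'|h'|h'|h'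
  · rw [pv_char_eq_of_toNat (d := '0') h']; decide
  · rw [pv_char_eq_of_toNat (d := '1') h']; decide
  · rw [pv_char_eq_of_toNat (d := '2') h']; decide
  · rw [pv_char_eq_of_toNat (d := '3') h']; decide
  · rw [pv_char_eq_of_toNat (d := '4') h']; decide
  · rw [pv_char_eq_of_toNat (d := '5') h']; decide
  · rw [pv_char_eq_of_toNat (d := '6') h']; decide
  · rw [pv_char_eq_of_toNat (d := '7') h']; decide
  · rw [pv_char_eq_of_toNat (d := '8') h']; decide
  · rw [pv_char_eq_of_toNat (d := '9') h']; decide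

-- the digit values (as Nats) of the non-alphabetic characters, in order
def pvDigits (cs : List Char) : List Nat :=
  (cs.filter (fun c => !(PySem.Chars.isalpha c))).map (fun c => c.toNat - 48)

theorem pv_digits_lt (cs : List Char)
    (hpre : ∀ c ∈ cs, (PySem.Chars.isalpha c || PySem.Chars.isdigit c) = true) :
    ∀ x ∈ pvDigits cs, x < 10 := by
  intro x hx
  unfold pvDigits at hx
  obtain ⟨c, hc, rfl⟩ := List.mem_map.mp hx
  obtain ⟨hmem, hna⟩ := List.mem_filter.mp hc
  have hd : PySem.Chars.isdigit c = true := by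
    have := hpre c hmem
    simp at hna
    simpa [hna] using this
  obtain ⟨_, h2⟩ := pv_isdigit_bounds c hd
  omega

-- A's loop builds exactly the int values of the filtered characters
theorem pv_foldA (cs : List Char) (acc : List Int) :
    cs.foldl (fun acc i => if PySem.Chars.isalpha i ≠ true then acc ++ [(PySem.Int.ofChars? [i]).getD 0] else acc) acc
      = acc ++ (cs.filter (fun c => !(PySem.Chars.isalpha c))).map (fun c => (PySem.Int.ofChars? [c]).getD 0) := by
  induction cs generalizing acc with
  | nil => simp
  | cons a t ih =>
    rw [List.foldl_cons]
    by_cases h : PySem.Chars.isalpha a = true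
    · rw [if_neg (by simp [h]), ih]
      simp [h]
    · rw [if_pos (by simp [h]), ih]
      simp [h]

theorem pv_mapA (cs : List Char)
    (hpre : ∀ c ∈ cs, (PySem.Chars.isalpha c || PySem.Chars.isdigit c) = true) :
    (cs.filter (fun c => !(PySem.Chars.isalpha c))).map (fun c => (PySem.Int.ofChars? [c]).getD 0)
      = (pvDigits cs).map (fun k => Int.ofNat k) := by
  unfold pvDigits
  rw [List.map_map]
  apply List.map_congr_left
  intro c hc
  obtain ⟨hmem, hna⟩ := List.mem_filter.mp hc
  have hd : PySem.Chars.isdigit c = true := by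
    have := hpre c hmem
    simp at hna
    simpa [hna] using this
  simp [pv_ofChars_digit c hd]

-- B's counting loop: each bucket ends at its start value plus the digit's multiplicity
theorem pv_foldB (cs : List Char) (cnt : List Nat) (hlen : cnt.length = 10)
    (hpre : ∀ c ∈ cs, (PySem.Chars.isalpha c || PySem.Chars.isdigit c) = true)
    (d : Nat) (hd : d < 10) :
    (cs.foldl (fun cnt c => if !(PySem.Chars.isalpha c)
                  then cnt.modify (((PySem.Int.ofChars? [c]).getD 0).toNat) (· + 1) else cnt) cnt).getD d 0
      = cnt.getD d 0 + (pvDigits cs).count d := by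
  induction cs generalizing cnt with
  | nil => simp [pvDigits]
  | cons a t ih =>
    have hpa := hpre a (List.mem_cons_self)
    have hpt : ∀ c ∈ t, (PySem.Chars.isalpha c || PySem.Chars.isdigit c) = true :=
      fun c hc => hpre c (List.mem_cons_of_mem a hc)
    by_cases h : PySem.Chars.isalpha a = true
    · rw [List.foldl_cons, if_neg (by simp [h]), ih cnt hlen hpt]
      simp [pvDigits, h]
    · have hd' : PySem.Chars.isdigit a = true := by simpa [h] using hpa
      obtain ⟨hb1, hb2⟩ := pv_isdigit_bounds a hd'
      have hk : (((PySem.Int.ofChars? [a]).getD 0).toNat) = a.toNat - 48 := by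
        rw [pv_ofChars_digit a hd']; simp
      rw [List.foldl_cons, if_pos (by simp [h]), hk, ih _ (by simp [hlen]) hpt]
      have hcount : (pvDigits (a :: t)).count d = (if a.toNat - 48 = d then 1 else 0) + (pvDigits t).count d := by
        simp only [pvDigits, List.filter_cons, h, Bool.not_false]
        by_cases h1 : a.toNat - 48 = d <;> simp [h1, Nat.add_comm]
      rw [hcount]
      have hget : (cnt.modify (a.toNat - 48) (· + 1)).getD d 0
          = if a.toNat - 48 = d then cnt.getD d 0 + 1 else cnt.getD d 0 := by
        rw [List.getD_eq_getElem?_getD, List.getD_eq_getElem?_getD, List.getElem?_modify]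
        cases hx : cnt[d]? with
        | none => rw [List.getElem?_eq_none_iff] at hx; omega
        | some v => split_ifs <;> simp
      rw [hget]
      split_ifs <;> omega

-- counts of B's output agree with counts of the digit list (cast to Int)
theorem pv_countB (l : List Nat) (hl : ∀ x ∈ l, x < 10) (a : Int) :
    ((List.range 10).flatMap (fun d => List.replicate (l.count d) ((d : Int)))).count a
      = (l.map (fun k => Int.ofNat k)).count a := by
  by_cases ha : 0 ≤ a ∧ a < 10
  · obtain ⟨ha0, ha10⟩ := ha
    have hk : a = ((a.toNat : Nat) : Int) := by omega
    rw [hk]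
    have hkl : a.toNat < 10 := by omega
    rw [show ((a.toNat : Int)) = Int.ofNat a.toNat from rfl,
      List.count_map_of_injective _ Int.ofNat (fun x y hxy => Int.ofNat.inj hxy) a.toNat]
    show ((List.range 10).flatMap (fun d => List.replicate (l.count d) ((d : Int)))).count _ = _
    rw [show (List.range 10) = [0,1,2,3,4,5,6,7,8,9] from rfl]
    have h10 : a.toNat = 0 ∨ a.toNat = 1 ∨ a.toNat = 2 ∨ a.toNat = 3 ∨ a.toNat = 4 ∨ a.toNat = 5 ∨
        a.toNat = 6 ∨ a.toNat = 7 ∨ a.toNat = 8 ∨ a.toNat = 9 := by omega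
    rcases h10 with h'|h'|h'|h'|h'|h'|h'|h'|h'|h' <;> rw [h'] <;>
      simp [List.flatMap_cons, List.count_append, List.count_replicate]
  · have h1 : a ∉ (List.range 10).flatMap (fun d => List.replicate (l.count d) ((d : Int))) := by
      intro hmem
      obtain ⟨d, hd, hmem'⟩ := List.mem_flatMap.mp hmem
      have := List.eq_of_mem_replicate hmem'
      have hd10 := List.mem_range.mp hd
      subst this
      exact ha ⟨by simp, by omega⟩
    have h2 : a ∉ l.map (fun k => Int.ofNat k) := by
      intro hmem
      obtain ⟨k, hk, rfl⟩ := List.mem_map.mp hmem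
      have := hl k hk
      refine ha ⟨by simp, ?_⟩
      simp only [Int.ofNat_eq_natCast]
      omega
    rw [List.count_eq_zero_of_not_mem h1, List.count_eq_zero_of_not_mem h2]

theorem pv_pairwiseB (m : Nat → Nat) :
    ((List.range 10).flatMap (fun d => List.replicate (m d) ((d : Int)))).Pairwise (· ≤ ·) := by
  rw [List.pairwise_flatMap]
  constructor
  · intro d _
    exact List.pairwise_replicate.mpr (Or.inr le_rfl)
  · have := List.pairwise_lt_range (n := 10)
    apply this.imp
    intro d e hde x hx y hy
    rw [List.eq_of_mem_replicate hx, List.eq_of_mem_replicate hy]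
    exact_mod_cast Nat.le_of_lt hde

-- ===== VERDICT (by name: the statement is the Claim_ definition above) =====
theorem solution_spec : Claim_equal_solution := by
  intro s _ hpre
  unfold Spec_solution solution solution_alt
  have hpre' : ∀ c ∈ s.toList, (PySem.Chars.isalpha c || PySem.Chars.isdigit c) = true :=
    List.all_eq_true.mp hpre
  rw [pv_foldA, List.nil_append, pv_mapA s.toList hpre']
  have hcounts : ∀ d ∈ List.range 10,
      List.replicate ((s.toList.foldl (fun cnt c => if !(PySem.Chars.isalpha c)
            then cnt.modify (((PySem.Int.ofChars? [c]).getD 0).toNat) (· + 1) else cnt)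
          (List.replicate 10 0)).getD d 0) ((d : Int))
        = List.replicate ((pvDigits s.toList).count d) ((d : Int)) := by
    intro d hd
    rw [pv_foldB s.toList _ (by simp) hpre' d (List.mem_range.mp hd)]
    have h0 : (List.replicate 10 (0 : Nat)).getD d 0 = 0 := by fin_cases hd <;> rfl
    rw [h0, Nat.zero_add]
  rw [List.flatMap_congr hcounts]
  exact PySem.List.sorted_id_eq_of_perm_of_pairwise _ _
    (List.perm_iff_count.mpr (pv_countB (pvDigits s.toList) (pv_digits_lt s.toList hpre')))
    (pv_pairwiseB _)
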